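-- pv_equiv track=rewrite | github.com/ddekshina/trial1 | backend/routes/quote_routes.py | calculate_database_costs
-- ===== SOURCE A (Python) =====
-- def calculate_database_costs(tables):
--     """Calculate database costs based on record counts"""
--     cost = 0
--     for table in tables:
--         records = table.get('records', 0)
--         if records < 1000:
--             cost += 40
--         elif records < 10000:
--             cost += 100
--         elif records < 100000:
--             cost += 200
--         elif records < 1000000:
--             cost += 300
--         else:
--             cost += 700
--     return cost
-- ===== SOURCE B (Python) =====
-- def calculate_database_costs(tables):
--     """Calculate database costs based on record counts.
--
--     Total = base fee of 40 per table, plus for each tier threshold the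
--     marginal cost increment times the number of tables at or above it.
--     """
--     recs = [t.get('records', 0) for t in tables]
--     cost = 40 * len(recs)
--     for threshold, increment in [(1000, 60), (10000, 100), (100000, 100), (1000000, 400)]:
--         cost += increment * sum(1 for r in recs if r >= threshold)
--     return cost
-- ===== Notes on version B (the rewrite author's own statement) =====
-- stated objective: alternative
-- what changed: Replaces per-table tier classification (five-way if/elif ladder in one accumulating pass) by a base-fee-plus-marginal-increments computation: 40 per table plus, for each threshold, the marginal cost increment times the count of tables whose records reach it, computed in staged counting passes.
import Mathlib
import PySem

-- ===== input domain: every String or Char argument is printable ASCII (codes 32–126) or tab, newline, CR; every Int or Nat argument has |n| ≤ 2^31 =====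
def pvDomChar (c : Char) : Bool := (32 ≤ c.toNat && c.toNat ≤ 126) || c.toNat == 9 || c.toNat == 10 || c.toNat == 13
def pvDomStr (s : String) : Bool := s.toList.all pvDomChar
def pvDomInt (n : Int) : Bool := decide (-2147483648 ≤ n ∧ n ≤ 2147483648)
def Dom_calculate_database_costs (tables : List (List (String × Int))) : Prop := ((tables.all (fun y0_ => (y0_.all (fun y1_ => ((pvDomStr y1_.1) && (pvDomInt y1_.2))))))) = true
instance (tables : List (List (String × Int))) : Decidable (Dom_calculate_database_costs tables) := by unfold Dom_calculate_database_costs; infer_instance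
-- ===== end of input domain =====

-- B replaces A's per-table five-way tier ladder by base fee (40 per table) plus
-- marginal increments counted per threshold in staged passes (alternative decomposition; same O(n)).


-- ===== PORT A =====
-- table.get('records', 0): first-match association-list lookup (the dict convention); shared by both ports
def pvGetRecords (table : List (String × Int)) : Int :=
  ((table.find? (fun kv => kv.1 == "records")).map Prod.snd).getD 0

def calculate_database_costs (tables : List (List (String × Int))) : Int :=
  tables.foldl (fun cost table =>
    let records := pvGetRecords table
    if records < 1000 then cost + 40
    else if records < 10000 then cost + 100
    else if records < 100000 then cost + 200
    else if records < 1000000 then cost + 300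
    else cost + 700) 0

-- ===== PORT B =====
-- the staged loop: [(threshold, marginal increment)]
def pvTierSteps : List (Int × Int) := [(1000, 60), (10000, 100), (100000, 100), (1000000, 400)]

def calculate_database_costs_alt (tables : List (List (String × Int))) : Int :=
  let recs := tables.map pvGetRecords
  pvTierSteps.foldl
    (fun cost p => cost + p.2 * ((recs.filter (fun r => decide (p.1 ≤ r))).length : Int))
    (40 * (recs.length : Int))

-- ===== PRECONDITION & SPEC =====
def Spec_calculate_database_costs (tables : List (List (String × Int))) (out : Int) : Prop := out = calculate_database_costs_alt tables
instance (tables : List (List (String × Int))) (out : Int) : Decidable (Spec_calculate_database_costs tables out) := by unfold Spec_calculate_database_costs; infer_instance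

-- ===== CLAIM (what is proved, stated in full; the proofs are below) =====
def Claim_equal_calculate_database_costs : Prop := ∀ (tables : List (List (String × Int))), Dom_calculate_database_costs tables → Spec_calculate_database_costs tables (calculate_database_costs tables)

-- ===== LEMMAS AND PROOFS =====

-- B's staged-counting value as a function of the record list
def pvF (rs : List Int) : Int :=
  40 * (rs.length : Int)
  + 60 * ((rs.filter (fun r => decide ((1000 : Int) ≤ r))).length : Int)
  + 100 * ((rs.filter (fun r => decide ((10000 : Int) ≤ r))).length : Int)
  + 100 * ((rs.filter (fun r => decide ((100000 : Int) ≤ r))).length : Int)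
  + 400 * ((rs.filter (fun r => decide ((1000000 : Int) ≤ r))).length : Int)

theorem pv_alt_eq_F (tables : List (List (String × Int))) :
    calculate_database_costs_alt tables = pvF (tables.map pvGetRecords) := by
  simp [calculate_database_costs_alt, pvTierSteps, pvF]

-- one element's contribution to the staged counts equals A's ladder value
theorem pvF_cons (r : Int) (rs : List Int) :
    pvF (r :: rs) = pvF rs +
      (if r < 1000 then 40 else if r < 10000 then 100 else if r < 100000 then 200
       else if r < 1000000 then (300 : Int) else 700) := by
  simp only [pvF, List.filter_cons]
  split_ifs <;> simp only [List.length_cons, decide_eq_true_eq] at * <;> push_cast <;> omega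

-- A's fold equals acc plus B's staged-counting value, by induction on the tables
theorem pv_foldA_eq (tables : List (List (String × Int))) (acc : Int) :
    tables.foldl (fun cost table =>
      let records := pvGetRecords table
      if records < 1000 then cost + 40
      else if records < 10000 then cost + 100
      else if records < 100000 then cost + 200
      else if records < 1000000 then cost + 300
      else cost + 700) acc
    = acc + pvF (tables.map pvGetRecords) := by
  induction tables generalizing acc with
  | nil => simp [pvF]
  | cons t ts ih =>
    simp only [List.foldl_cons, ih, List.map_cons, pvF_cons]
    split_ifs <;> ring

-- ===== VERDICT (by name: the statement is the Claim_ definition above) =====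
theorem calculate_database_costs_spec : Claim_equal_calculate_database_costs := by
  intro tables _
  show _ = _
  rw [pv_alt_eq_F]
  unfold calculate_database_costs
  simpa using pv_foldA_eq tables 0
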